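-- pv_equiv track=rewrite | github.com/Tagl/infinite_simples | pinperms.py | factor_pinword
-- ===== SOURCE A (Python) =====
-- from typing import (
--     TYPE_CHECKING,
--     Callable,
--     ClassVar,
--     Deque,
--     Dict,
--     Iterable,
--     Iterator,
--     List,
--     Optional,
--     Set,
--     Tuple,
--     TypeVar,
--     Union,
-- )
--
-- DIRS = "ULDR"
--
-- def factor_pinword(word: str) -> List[str]:
--     """
--     Factors a pinword into its strong numeral led factor decomposition.
--
--     Examples:
--         >>> factor_pinword("14L2UR")
--         ['1', '4L', '2UR']
--     """
--     at = 0
--     factor_list = []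
--     while at < len(word):
--         cur = at+1
--         while cur < len(word) and word[cur] in DIRS:
--             cur += 1
--         factor_list.append(word[at:cur])
--         at = cur
--     return factor_list
-- ===== SOURCE B (Python) =====
-- import re
--
-- def factor_pinword(word):
--     return re.findall(r'.[ULDR]*', word, re.DOTALL)
-- ===== Notes on version B (the rewrite author's own statement) =====
-- stated objective: idiomatic
-- what changed: Replaces the manual outer/inner index scan with a single regex tokenizer re.findall(r'.[ULDR]*', word, re.DOTALL): one lead char plus a maximal run of direction chars.
import Mathlib
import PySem

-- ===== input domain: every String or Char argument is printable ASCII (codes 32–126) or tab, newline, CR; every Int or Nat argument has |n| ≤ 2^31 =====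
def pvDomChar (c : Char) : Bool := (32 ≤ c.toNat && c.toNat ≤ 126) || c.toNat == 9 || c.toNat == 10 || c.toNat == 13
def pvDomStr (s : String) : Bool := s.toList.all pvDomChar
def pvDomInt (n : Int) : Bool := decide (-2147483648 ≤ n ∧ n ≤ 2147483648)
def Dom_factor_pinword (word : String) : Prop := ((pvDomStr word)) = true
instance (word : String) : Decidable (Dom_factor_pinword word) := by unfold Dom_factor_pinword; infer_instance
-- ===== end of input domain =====

-- ===== PORT A =====
-- B replaces A's manual outer/inner index scan by a regex tokenizer (one lead char + maximal ULDR run); same return value, objective: idiomatic.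

-- module constant DIRS = "ULDR"; 'c in DIRS' is membership in these four chars
def pinDIRS : List Char := ['U', 'L', 'D', 'R']

-- inner while loop: 'while cur < len(word) and word[cur] in DIRS: cur += 1'
def fpwInner (cs : List Char) (cur : Nat) : Nat :=
  if h : cur < cs.length then
    if pinDIRS.contains cs[cur] then fpwInner cs (cur + 1) else cur
  else cur
termination_by cs.length - cur

theorem fpwInner_ge (cs : List Char) (cur : Nat) : cur ≤ fpwInner cs cur := by
  fun_induction fpwInner with
  | case1 cur h hd ih => omega
  | case2 => omega
  | case3 => omega

-- outer while loop: factor_list.append(word[at:cur]); at = cur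
-- (word[at:cur] with 0 ≤ at ≤ cur ≤ len: exactly (cs.drop at).take (cur - at))
def fpwOuter (cs : List Char) (at_ : Nat) (factor_list : List String) : List String :=
  if h : at_ < cs.length then
    let cur := fpwInner cs (at_ + 1)
    fpwOuter cs cur (factor_list ++ [String.ofList ((cs.drop at_).take (cur - at_))])
  else factor_list
termination_by cs.length - at_
decreasing_by
  have := fpwInner_ge cs (at_ + 1)
  omega

def factor_pinword (word : String) : List String :=
  fpwOuter word.toList 0 []

-- ===== PORT B =====
-- Source B: re.findall(r'.[ULDR]*', word, re.DOTALL).  The regex engine scans left to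
-- right; each match is one arbitrary char ('.' with DOTALL) followed by the greedy
-- maximal run of chars from the class [ULDR]; ported step for step as that scan.
def fpwTokens (cs : List Char) : List String :=
  match cs with
  | [] => []
  | c :: rest =>
    String.ofList (c :: rest.takeWhile (fun d => d = 'U' ∨ d = 'L' ∨ d = 'D' ∨ d = 'R'))
      :: fpwTokens (rest.dropWhile (fun d => d = 'U' ∨ d = 'L' ∨ d = 'D' ∨ d = 'R'))
termination_by cs.length
decreasing_by
  have := List.length_dropWhile_le (p := fun d : Char => decide (d = 'U' ∨ d = 'L' ∨ d = 'D' ∨ d = 'R')) (l := rest)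
  simp_all

def factor_pinword_alt (word : String) : List String :=
  fpwTokens word.toList

-- ===== PRECONDITION & SPEC =====
def Spec_factor_pinword (word : String) (out : List String) : Prop := out = factor_pinword_alt word
instance (word : String) (out : List String) : Decidable (Spec_factor_pinword word out) := by unfold Spec_factor_pinword; infer_instance

-- ===== CLAIM (what is proved, stated in full; the proofs are below) =====
def Claim_equal_factor_pinword : Prop := ∀ (word : String), Dom_factor_pinword word → Spec_factor_pinword word (factor_pinword word)

-- ===== LEMMAS AND PROOFS =====

-- the two char-class tests agree
theorem fpw_isDir_eq (c : Char) :
    pinDIRS.contains c = decide (c = 'U' ∨ c = 'L' ∨ c = 'D' ∨ c = 'R') := by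
  simp [pinDIRS, List.contains_eq_mem]

theorem fpw_take_takeWhile (p : Char → Bool) (l : List Char) :
    l.take (l.takeWhile p).length = l.takeWhile p := by
  induction l with
  | nil => rfl
  | cons c t ih => by_cases h : p c <;> simp [h, ih]

theorem fpw_drop_takeWhile (p : Char → Bool) (l : List Char) :
    l.drop (l.takeWhile p).length = l.dropWhile p := by
  induction l with
  | nil => rfl
  | cons c t ih => by_cases h : p c <;> simp [h, ih]

-- the inner scan computes cur = start + length of the maximal DIRS run from start
theorem fpwInner_eq (cs : List Char) (cur : Nat) :
    fpwInner cs cur = cur + ((cs.drop cur).takeWhile (fun d => d = 'U' ∨ d = 'L' ∨ d = 'D' ∨ d = 'R')).length := by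
  fun_induction fpwInner with
  | case1 cur h hd ih =>
    rw [ih]
    rw [List.drop_eq_getElem_cons h]
    rw [fpw_isDir_eq, decide_eq_true_iff] at hd
    rw [List.takeWhile_cons_of_pos (by simpa using hd)]
    simp only [List.length_cons]
    omega
  | case2 cur h hd =>
    rw [List.drop_eq_getElem_cons h]
    rw [fpw_isDir_eq] at hd
    rw [List.takeWhile_cons_of_neg (by simpa using hd)]
    simp
  | case3 cur h =>
    have : cs.drop cur = [] := List.drop_eq_nil_of_le (by omega)
    simp [this]

-- loop invariant: the outer loop from position at_ produces acc ++ tokens of the suffix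
theorem fpwOuter_eq (cs : List Char) (at_ : Nat) (acc : List String) :
    fpwOuter cs at_ acc = acc ++ fpwTokens (cs.drop at_) := by
  fun_induction fpwOuter with
  | case1 at_ acc h cur ih =>
    rw [ih]
    have hdrop : cs.drop at_ = cs[at_] :: cs.drop (at_ + 1) := List.drop_eq_getElem_cons h
    set p : Char → Bool := fun d => decide (d = 'U' ∨ d = 'L' ∨ d = 'D' ∨ d = 'R') with hp
    have hcur : cur = at_ + 1 + ((cs.drop (at_ + 1)).takeWhile p).length := fpwInner_eq cs (at_ + 1)
    have hk : cur - at_ = ((cs.drop (at_ + 1)).takeWhile p).length + 1 := by omega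
    rw [hdrop, fpwTokens]
    rw [hk]
    have htake : (cs[at_] :: cs.drop (at_ + 1)).take (((cs.drop (at_ + 1)).takeWhile p).length + 1)
        = cs[at_] :: (cs.drop (at_ + 1)).takeWhile p := by
      simp only [List.take_succ_cons, fpw_take_takeWhile]
    rw [htake]
    have hdrop2 : cs.drop cur = (cs.drop (at_ + 1)).dropWhile p := by
      rw [← fpw_drop_takeWhile p (cs.drop (at_ + 1)), List.drop_drop]
      exact congrArg (fun n => List.drop n cs) hcur
    rw [hdrop2]
    simp only [hp, List.append_assoc, List.singleton_append]
  | case2 at_ acc h =>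
    have : cs.drop at_ = [] := List.drop_eq_nil_of_le (by omega)
    rw [this]
    simp [fpwTokens]

-- ===== VERDICT (by name: the statement is the Claim_ definition above) =====
theorem factor_pinword_spec : Claim_equal_factor_pinword := by
  intro word _
  show factor_pinword word = factor_pinword_alt word
  unfold factor_pinword factor_pinword_alt
  simpa using fpwOuter_eq word.toList 0 []
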